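-- pv_equiv track=rewrite | github.com/vlongle/learning-hive | src/shell/fleet/data/data_utilize.py | get_local_label
-- ===== SOURCE A (Python) =====
-- def get_local_label_for_task(global_y, target_task_id, target_class_sequence, num_classes_per_task):
--     """
--     Get the local label for the target task. If global_y is not in the target task, return -1.
--     """
--     task_classes = list(target_class_sequence[target_task_id * num_classes_per_task: (
--         target_task_id + 1) * num_classes_per_task])
--     local_y = task_classes.index(global_y) if global_y in task_classes else -1
--     return local_y
--
-- def get_local_label(global_y, target_class_sequence, num_classes_per_task):
--     num_tasks = len(target_class_sequence) // num_classes_per_task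
--     local_y = -1
--     local_task_id = -1
--     for task_id in range(num_tasks):
--         temp_local_y = get_local_label_for_task(
--             global_y, task_id, target_class_sequence, num_classes_per_task)
--         if temp_local_y != -1:
--             local_y = temp_local_y
--             local_task_id = task_id
--             break
--     return local_y, local_task_id
-- ===== SOURCE B (Python) =====
-- def get_local_label(global_y, target_class_sequence, num_classes_per_task):
--     num_tasks = len(target_class_sequence) // num_classes_per_task
--     try:
--         idx = target_class_sequence.index(global_y)
--     except ValueError:
--         return -1, -1
--     task_id, local_y = divmod(idx, num_classes_per_task)
--     if 0 <= task_id < num_tasks: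
--         return local_y, task_id
--     return -1, -1
-- ===== Notes on version B (the rewrite author's own statement) =====
-- stated objective: simpler
-- what changed: Replaced the per-task loop with its slice-and-search helper by a single list.index over the whole sequence followed by divmod to split the global index into (task_id, local_y), plus a bound check for the ignored trailing region.
import Mathlib
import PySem

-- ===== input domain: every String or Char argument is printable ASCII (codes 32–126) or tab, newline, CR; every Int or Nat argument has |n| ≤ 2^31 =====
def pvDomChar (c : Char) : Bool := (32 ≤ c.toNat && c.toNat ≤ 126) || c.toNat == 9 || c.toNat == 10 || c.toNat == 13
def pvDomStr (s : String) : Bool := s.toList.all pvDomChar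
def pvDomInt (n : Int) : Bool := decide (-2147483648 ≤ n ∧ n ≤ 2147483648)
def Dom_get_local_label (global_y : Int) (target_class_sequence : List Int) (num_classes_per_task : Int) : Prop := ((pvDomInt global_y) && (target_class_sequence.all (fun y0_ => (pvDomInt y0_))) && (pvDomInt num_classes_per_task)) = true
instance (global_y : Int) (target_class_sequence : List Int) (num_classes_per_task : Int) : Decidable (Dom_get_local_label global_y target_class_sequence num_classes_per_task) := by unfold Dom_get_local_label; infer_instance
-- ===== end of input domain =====

-- B replaces A's per-task slice-and-search loop by one global list.index plus divmod (simpler decomposition, same O(n) cost).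


-- ===== PORT A =====
-- helper: get_local_label_for_task (slice the task's classes, then .index if member else -1)
def get_local_label_for_task (global_y : Int) (target_task_id : Int) (target_class_sequence : List Int) (num_classes_per_task : Int) : Int :=
  let task_classes := PySem.List.slice target_class_sequence
    (some (target_task_id * num_classes_per_task)) (some ((target_task_id + 1) * num_classes_per_task))
  if global_y ∈ task_classes then
    match PySem.List.index? task_classes global_y with
    | some k => (k : Int)   -- .index never raises here: membership was just checked
    | none => -1
  else -1

-- the 'for task_id in range(num_tasks): … break' loop, over the materialised range
def get_local_label_loop (global_y : Int) (target_class_sequence : List Int) (num_classes_per_task : Int) : List Int → Int × Int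
  | [] => (-1, -1)
  | task_id :: rest =>
    let temp_local_y := get_local_label_for_task global_y task_id target_class_sequence num_classes_per_task
    if temp_local_y ≠ -1 then (temp_local_y, task_id)
    else get_local_label_loop global_y target_class_sequence num_classes_per_task rest

def get_local_label (global_y : Int) (target_class_sequence : List Int) (num_classes_per_task : Int) : Int × Int :=
  let num_tasks := PySem.Int.floordiv (target_class_sequence.length : Int) num_classes_per_task
  get_local_label_loop global_y target_class_sequence num_classes_per_task (PySem.List.pyRange 0 num_tasks 1)

-- ===== PORT B =====
def get_local_label_alt (global_y : Int) (target_class_sequence : List Int) (num_classes_per_task : Int) : Int × Int :=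
  let num_tasks := PySem.Int.floordiv (target_class_sequence.length : Int) num_classes_per_task
  match PySem.List.index? target_class_sequence global_y with
  | none => (-1, -1)                            -- except ValueError
  | some idx =>
    match PySem.Int.divmod? (idx : Int) num_classes_per_task with
    | none => (-1, -1)                          -- unreachable under Pre_ (num_classes_per_task ≠ 0)
    | some (task_id, local_y) =>
      if 0 ≤ task_id ∧ task_id < num_tasks then (local_y, task_id) else (-1, -1)

-- ===== PRECONDITION & SPEC =====
-- A raises ZeroDivisionError at 'len(...) // num_classes_per_task' when num_classes_per_task == 0; excluded.
def Pre_get_local_label (global_y : Int) (target_class_sequence : List Int) (num_classes_per_task : Int) : Prop :=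
  num_classes_per_task ≠ 0
instance (global_y : Int) (target_class_sequence : List Int) (num_classes_per_task : Int) : Decidable (Pre_get_local_label global_y target_class_sequence num_classes_per_task) := by unfold Pre_get_local_label; infer_instance
def pvWitness_get_local_label : Int × List Int × Int := (3, [0, 3, 1, 2], 2)

def Spec_get_local_label (global_y : Int) (target_class_sequence : List Int) (num_classes_per_task : Int) (out : Int × Int) : Prop := out = get_local_label_alt global_y target_class_sequence num_classes_per_task
instance (global_y : Int) (target_class_sequence : List Int) (num_classes_per_task : Int) (out : Int × Int) : Decidable (Spec_get_local_label global_y target_class_sequence num_classes_per_task out) := by unfold Spec_get_local_label; infer_instance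

-- ===== CLAIM (what is proved, stated in full; the proofs are below) =====
def Claim_equal_get_local_label : Prop := ∀ (global_y : Int) (target_class_sequence : List Int) (num_classes_per_task : Int), Dom_get_local_label global_y target_class_sequence num_classes_per_task → Pre_get_local_label global_y target_class_sequence num_classes_per_task → Spec_get_local_label global_y target_class_sequence num_classes_per_task (get_local_label global_y target_class_sequence num_classes_per_task)

-- ===== LEMMAS AND PROOFS =====

-- a task whose slice misses global_y contributes -1
theorem task_of_not_mem (g : Int) (seq : List Int) (hg : g ∉ seq) (t c : Int) :
    get_local_label_for_task g t seq c = -1 := by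
  unfold get_local_label_for_task
  rw [if_neg]
  intro hmem
  exact hg (PySem.List.mem_of_mem_slice seq _ _ hmem)

-- if every task in the range misses, the loop returns (-1,-1)
theorem loop_of_all_miss (g : Int) (seq : List Int) (c : Int) (ts : List Int)
    (h : ∀ t ∈ ts, get_local_label_for_task g t seq c = -1) :
    get_local_label_loop g seq c ts = (-1, -1) := by
  induction ts with
  | nil => rfl
  | cons t ts ih =>
    unfold get_local_label_loop
    rw [h t (by simp)]
    simp only [ne_eq, not_true_eq_false, if_neg, not_false_eq_true]
    exact ih (fun u hu => h u (by simp [hu]))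

-- a full task slice lying strictly before the first occurrence contains no g
theorem task_miss (g : Int) (P S : List Int) (hgP : g ∉ P) (c t : Int)
    (hc : 0 < c) (ht : 0 ≤ t) (hub : (t + 1) * c ≤ (P.length : Int)) :
    get_local_label_for_task g t (P ++ g :: S) c = -1 := by
  have h0 : 0 ≤ t * c := mul_nonneg ht (le_of_lt hc)
  have h1 : 0 ≤ (t + 1) * c := by nlinarith
  have hsplit : (t + 1) * c = t * c + c := by ring
  have hAle : (t * c).toNat ≤ P.length := by omega
  have hBle : ((t + 1) * c).toNat ≤ P.length := by omega
  unfold get_local_label_for_task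
  rw [PySem.List.slice_toNat _ h0 h1]
  rw [List.drop_append_of_le_length hAle]
  rw [List.take_append_of_le_length (by simp; omega)]
  rw [if_neg]
  intro hmem
  exact hgP (List.mem_of_mem_drop (List.mem_of_mem_take hmem))

-- the task slice containing the first occurrence yields the local index r
theorem task_hit (g : Int) (P S : List Int) (hgP : g ∉ P) (c q r : Int)
    (hc : 0 < c) (hq : 0 ≤ q) (hqr : q * c + r = (P.length : Int)) (hr0 : 0 ≤ r) (hrc : r < c) :
    get_local_label_for_task g q (P ++ g :: S) c = r := by
  have h0 : 0 ≤ q * c := mul_nonneg hq (le_of_lt hc)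
  have h1 : 0 ≤ (q + 1) * c := by nlinarith
  have hsplit : (q + 1) * c = q * c + c := by ring
  have hA : (q * c).toNat ≤ P.length := by omega
  have hlenD : (P.drop (q * c).toNat).length = r.toNat := by simp; omega
  have hn : ((q + 1) * c).toNat - (q * c).toNat = c.toNat := by omega
  unfold get_local_label_for_task
  rw [PySem.List.slice_toNat _ h0 h1, hn]
  rw [List.drop_append_of_le_length hA]
  rw [List.take_append]
  rw [List.take_of_length_le (by omega)]
  have hm : c.toNat - (P.drop (q * c).toNat).length = (c.toNat - r.toNat - 1) + 1 := by
    rw [hlenD]; omega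
  rw [hm, List.take_succ_cons]
  have hpre : g ∉ P.drop (q * c).toNat := fun h => hgP (List.mem_of_mem_drop h)
  rw [if_pos (by simp)]
  have hidx : PySem.List.index? (P.drop (q * c).toNat ++ g :: S.take (c.toNat - r.toNat - 1)) g
      = some r.toNat := by
    rw [PySem.List.index?_eq_some_iff]
    exact ⟨P.drop (q * c).toNat, S.take (c.toNat - r.toNat - 1), rfl, hlenD, hpre⟩
  rw [hidx]
  simp only [Int.toNat_of_nonneg hr0]

-- the loop, started at a ≤ q with q < num_tasks, walks to task q and returns (r, q)
theorem loop_hit (g : Int) (P S : List Int) (hgP : g ∉ P) (c q r T : Int)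
    (hc : 0 < c) (hqr : q * c + r = (P.length : Int)) (hr0 : 0 ≤ r) (hrc : r < c) (hqT : q < T) :
    ∀ (k : Nat) (a : Int), (q - a).toNat = k → 0 ≤ a → a ≤ q →
      get_local_label_loop g (P ++ g :: S) c (PySem.List.pyRange a T 1) = (r, q) := by
  intro k
  induction k with
  | zero =>
    intro a hk ha haq
    have haq' : a = q := by omega
    subst haq'
    rw [PySem.List.pyRange_one_cons hqT]
    unfold get_local_label_loop
    rw [task_hit g P S hgP c a r hc ha hqr hr0 hrc]
    rw [if_pos (by omega)]
  | succ k ih =>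
    intro a hk ha haq
    have haq' : a < q := by omega
    rw [PySem.List.pyRange_one_cons (by omega)]
    unfold get_local_label_loop
    rw [task_miss g P S hgP c a hc ha (by nlinarith)]
    simp only [ne_eq, not_true_eq_false, if_neg, not_false_eq_true]
    exact ih (a + 1) (by omega) (by omega) (by omega)

-- ===== VERDICT (by name: the statement is the Claim_ definition above) =====
theorem get_local_label_spec : Claim_equal_get_local_label := by
  intro g seq c _ hpre
  unfold Spec_get_local_label
  have hc0 : c ≠ 0 := hpre
  cases hidx : PySem.List.index? seq g with
  | none =>
    have hg : g ∉ seq := (PySem.List.index?_eq_none_iff seq g).mp hidx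
    have hidx' : List.idxOf? g seq = none := by
      rw [← PySem.List.index?_eq_idxOf?]; exact hidx
    have hB : get_local_label_alt g seq c = (-1, -1) := by
      simp [get_local_label_alt, hidx']
    rw [hB]
    exact loop_of_all_miss g seq c _ (fun t _ => task_of_not_mem g seq hg t c)
  | some idx =>
    obtain ⟨P, S, hseq, hlen, hgP⟩ := (PySem.List.index?_eq_some_iff seq g idx).mp hidx
    subst hseq
    set q := PySem.Int.floordiv (idx : Int) c with hqdef
    set r := PySem.Int.mod (idx : Int) c with hrdef
    set T := PySem.Int.floordiv ((P ++ g :: S).length : Int) c with hTdef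
    have hdm : PySem.Int.divmod? (idx : Int) c = some (q, r) := by
      simp [PySem.Int.divmod?, hc0, hqdef, hrdef, PySem.Int.floordiv, PySem.Int.mod]
    have hB : get_local_label_alt g (P ++ g :: S) c
        = if 0 ≤ q ∧ q < T then (r, q) else (-1, -1) := by
      have hidx' : List.idxOf? g (P ++ g :: S) = some idx := by
        rw [← PySem.List.index?_eq_idxOf?]; exact hidx
      simp only [get_local_label_alt, PySem.List.index?_eq_idxOf?, hidx', hdm]
      rw [← hTdef]
    have hA : get_local_label g (P ++ g :: S) c
        = get_local_label_loop g (P ++ g :: S) c (PySem.List.pyRange 0 T 1) := rfl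
    rw [hB, hA]
    have hqr : q * c + r = (idx : Int) := PySem.Int.floordiv_mul_add_mod _ _
    have hTm : T * c + PySem.Int.mod ((P ++ g :: S).length : Int) c = ((P ++ g :: S).length : Int) :=
      PySem.Int.floordiv_mul_add_mod _ _
    have hlenseq : ((P ++ g :: S).length : Int) = (P.length : Int) + 1 + (S.length : Int) := by
      simp; omega
    rcases lt_or_gt_of_ne hc0 with hcneg | hcpos
    · -- c < 0: num_tasks < 0 so the range is empty; B's bound check fails too
      have hmb := PySem.Int.mod_neg_bounds ((P ++ g :: S).length : Int) hcneg
      have hTneg : T < 0 := by nlinarith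
      rw [PySem.List.pyRange_one_eq_nil (by omega)]
      rw [if_neg (by rintro ⟨hq0, hqT⟩; omega)]
      rfl
    · -- c > 0
      have hr0 : 0 ≤ r := PySem.Int.mod_nonneg _ hcpos
      have hrc : r < c := PySem.Int.mod_lt _ hcpos
      have hq0 : 0 ≤ q := by nlinarith
      have hm0 : 0 ≤ PySem.Int.mod ((P ++ g :: S).length : Int) c := PySem.Int.mod_nonneg _ hcpos
      have hmc : PySem.Int.mod ((P ++ g :: S).length : Int) c < c := PySem.Int.mod_lt _ hcpos
      by_cases hqT : q < T
      · rw [if_pos ⟨hq0, hqT⟩]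
        exact loop_hit g P S hgP c q r T hcpos (by omega) hr0 hrc hqT
          (q - 0).toNat 0 rfl le_rfl hq0
      · rw [if_neg (fun h => hqT h.2)]
        apply loop_of_all_miss
        intro t ht
        have ht' := PySem.List.mem_pyRange_one.mp ht
        have hTq : T ≤ q := le_of_not_gt hqT
        have h1 : (t + 1) * c ≤ T * c :=
          mul_le_mul_of_nonneg_right (by omega) (le_of_lt hcpos)
        have h2 : T * c ≤ q * c := mul_le_mul_of_nonneg_right hTq (le_of_lt hcpos)
        exact task_miss g P S hgP c t hcpos ht'.1 (by omega)
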